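-- pv_equiv track=rewrite | github.com/EduardoMiranda06/Linguagem-de-Programacao-----SENAI | Lista 17 de LP.py | localizar_elementos
-- ===== SOURCE A (Python) =====
-- def localizar_elementos(lista, elemento1, elemento2):
--     indice1 = -1
--     indice2 = -1
--     contador = 0
--
--     while contador < len(lista):
--         if lista[contador] == elemento1 and indice1 == -1:
--             indice1 = contador
--
--         if lista[contador] == elemento2 and indice2 == -1:
--             indice2 = contador
--
--         contador += 1
--
--     return indice1, indice2
-- ===== SOURCE B (Python) =====
-- def localizar_elementos(lista, elemento1, elemento2):
--     def primeiro_indice(el):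
--         try:
--             return lista.index(el)
--         except ValueError:
--             return -1
--     return primeiro_indice(elemento1), primeiro_indice(elemento2)
-- ===== Notes on version B (the rewrite author's own statement) =====
-- stated objective: idiomatic
-- what changed: Replaced the counter-driven fused while-loop maintaining two -1 sentinels with two independent list.index lookups (one separate scan per target, ValueError mapped to -1).
import Mathlib
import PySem

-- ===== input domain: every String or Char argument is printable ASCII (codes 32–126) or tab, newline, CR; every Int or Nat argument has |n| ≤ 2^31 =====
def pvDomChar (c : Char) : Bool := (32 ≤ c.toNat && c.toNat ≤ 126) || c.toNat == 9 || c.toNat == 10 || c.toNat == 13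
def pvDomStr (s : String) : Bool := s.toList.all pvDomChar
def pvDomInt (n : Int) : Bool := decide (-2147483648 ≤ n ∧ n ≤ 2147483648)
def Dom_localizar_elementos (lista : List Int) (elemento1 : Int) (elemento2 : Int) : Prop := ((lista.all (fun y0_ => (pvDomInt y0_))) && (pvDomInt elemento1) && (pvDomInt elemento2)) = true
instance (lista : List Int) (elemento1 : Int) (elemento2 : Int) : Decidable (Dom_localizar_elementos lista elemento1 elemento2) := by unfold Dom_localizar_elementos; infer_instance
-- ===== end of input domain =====

-- B replaces A's fused counter-driven while-loop (two -1 sentinels) with two independent first-index lookups; objective: idiomatic.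


-- ===== PORT A =====
-- the while-loop: walks the list with the counter `contador`, updating the two sentinels
def pvLoopA (elemento1 elemento2 : Int) : List Int → Int → Int → Int → Int × Int
  | [], _, indice1, indice2 => (indice1, indice2)
  | x :: rest, contador, indice1, indice2 =>
    let indice1' := if x = elemento1 ∧ indice1 = -1 then contador else indice1
    let indice2' := if x = elemento2 ∧ indice2 = -1 then contador else indice2
    pvLoopA elemento1 elemento2 rest (contador + 1) indice1' indice2'

def localizar_elementos (lista : List Int) (elemento1 : Int) (elemento2 : Int) : Int × Int :=
  pvLoopA elemento1 elemento2 lista 0 (-1) (-1)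

-- ===== PORT B =====
-- try: lista.index(el) except ValueError: -1
def pvPrimeiroIndice (lista : List Int) (el : Int) : Int :=
  match PySem.List.index? lista el with
  | some k => (k : Int)
  | none => -1

def localizar_elementos_alt (lista : List Int) (elemento1 : Int) (elemento2 : Int) : Int × Int :=
  (pvPrimeiroIndice lista elemento1, pvPrimeiroIndice lista elemento2)

-- ===== PRECONDITION & SPEC =====
def Spec_localizar_elementos (lista : List Int) (elemento1 : Int) (elemento2 : Int) (out : Int × Int) : Prop := out = localizar_elementos_alt lista elemento1 elemento2
instance (lista : List Int) (elemento1 : Int) (elemento2 : Int) (out : Int × Int) : Decidable (Spec_localizar_elementos lista elemento1 elemento2 out) := by unfold Spec_localizar_elementos; infer_instance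

-- ===== CLAIM (what is proved, stated in full; the proofs are below) =====
def Claim_equal_localizar_elementos : Prop := ∀ (lista : List Int) (elemento1 : Int) (elemento2 : Int), Dom_localizar_elementos lista elemento1 elemento2 → Spec_localizar_elementos lista elemento1 elemento2 (localizar_elementos lista elemento1 elemento2)

-- ===== LEMMAS AND PROOFS =====
-- value the loop leaves in one sentinel, as a function of the suffix and the entry counter
def pvIdxFrom (lista : List Int) (el : Int) (c : Int) : Int :=
  match PySem.List.index? lista el with
  | some k => c + (k : Int)
  | none => -1

lemma pvLoopA_eq (elemento1 elemento2 : Int) (lista : List Int) :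
    ∀ (c i1 i2 : Int), 0 ≤ c →
    pvLoopA elemento1 elemento2 lista c i1 i2 =
      ((if i1 = -1 then pvIdxFrom lista elemento1 c else i1),
       (if i2 = -1 then pvIdxFrom lista elemento2 c else i2)) := by
  induction lista with
  | nil => intro c i1 i2 hc; simp [pvLoopA, pvIdxFrom, PySem.List.index?]
  | cons x rest ih =>
    intro c i1 i2 hc
    rw [pvLoopA, ih (c + 1) _ _ (by omega)]
    have comp : ∀ (el : Int) (i : Int),
        (if (if x = el ∧ i = -1 then c else i) = -1 then pvIdxFrom rest el (c + 1)
         else (if x = el ∧ i = -1 then c else i)) =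
        (if i = -1 then pvIdxFrom (x :: rest) el c else i) := by
      intro el i
      by_cases hi : i = -1
      · by_cases hx : x = el
        · subst hx
          rw [show (if x = x ∧ i = -1 then c else i) = c from if_pos ⟨rfl, hi⟩,
              if_neg (show ¬c = -1 by omega), if_pos hi]
          unfold pvIdxFrom
          rw [PySem.List.index?_cons_self]
          simp
        · rw [show (if x = el ∧ i = -1 then c else i) = i from if_neg (fun h => hx h.1),
              if_pos hi, if_pos hi]
          unfold pvIdxFrom
          rw [PySem.List.index?_cons_of_ne rest hx]
          cases PySem.List.index? rest el with
          | none => rfl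
          | some k => simp; omega
      · rw [show (if x = el ∧ i = -1 then c else i) = i from if_neg (fun h => hi h.2),
            if_neg hi, if_neg hi]
    rw [comp elemento1 i1, comp elemento2 i2]

lemma pvIdxFrom_zero (lista : List Int) (el : Int) :
    pvIdxFrom lista el 0 = pvPrimeiroIndice lista el := by
  unfold pvIdxFrom pvPrimeiroIndice
  cases PySem.List.index? lista el <;> simp

-- ===== VERDICT (by name: the statement is the Claim_ definition above) =====
theorem localizar_elementos_spec : Claim_equal_localizar_elementos := by
  intro lista elemento1 elemento2 _
  unfold Spec_localizar_elementos localizar_elementos localizar_elementos_alt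
  rw [pvLoopA_eq elemento1 elemento2 lista 0 (-1) (-1) le_rfl]
  simp [pvIdxFrom_zero]
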